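-- pv_equiv track=rewrite | github.com/shakedzy/convpath | convpath/utils.py | deflatten
-- ===== SOURCE A (Python) =====
-- from typing import TypeVar, Any
--
-- T = TypeVar('T')
--
-- def deflatten(flat_list: list[T], original_shape_list: list[list[Any]]) -> list[list[T]]:
--     """
--     De-flattens a flattened list of lists into its original nested form
--
--     Parameters
--     ----------
--     flat_list : list[T]
--         The flattened list to be de-flattened
--     original_shape_list : list[list[Any]]
--         Any list of lists of the original shape that the flattened list was derived from
--
--     Returns
--      -------
--     list[list[T]]
--         The de-flattened nested lists
--     """
--     de_flattened = []
--     index = 0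
--
--     # Calculate sublist lengths from the original list
--     sublist_lengths = [len(sublist) for sublist in original_shape_list]
--
--     for length in sublist_lengths:
--         de_flattened.append(flat_list[index:index + length])
--         index += length
--
--     return de_flattened
-- ===== SOURCE B (Python) =====
-- def deflatten(flat_list, original_shape_list):
--     labels = [j for j, sublist in enumerate(original_shape_list) for _ in sublist]
--     result = [[] for _ in original_shape_list]
--     for x, j in zip(flat_list, labels):
--         result[j].append(x)
--     return result
-- ===== Notes on version B (the rewrite author's own statement) =====
-- stated objective: alternative
-- what changed: Instead of cutting consecutive slices with a running index, B labels each target position with its sublist number, pre-allocates all output buckets, and distributes the flat elements into the buckets in one zip pass (zip truncation reproduces A's clamping slices).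
import Mathlib
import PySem

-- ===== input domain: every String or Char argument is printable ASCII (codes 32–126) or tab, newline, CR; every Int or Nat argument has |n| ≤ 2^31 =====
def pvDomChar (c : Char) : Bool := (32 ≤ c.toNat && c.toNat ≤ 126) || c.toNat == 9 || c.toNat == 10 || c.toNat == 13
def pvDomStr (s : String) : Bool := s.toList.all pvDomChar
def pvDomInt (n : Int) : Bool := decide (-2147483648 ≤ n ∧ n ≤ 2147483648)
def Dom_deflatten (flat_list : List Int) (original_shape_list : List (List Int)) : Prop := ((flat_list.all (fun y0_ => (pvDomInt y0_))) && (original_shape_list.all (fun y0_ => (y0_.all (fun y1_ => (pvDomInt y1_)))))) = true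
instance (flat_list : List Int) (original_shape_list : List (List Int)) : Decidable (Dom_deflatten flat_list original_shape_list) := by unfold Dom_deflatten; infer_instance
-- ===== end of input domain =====

-- B distributes the flat elements into pre-allocated per-sublist buckets via position labels instead of cutting consecutive slices with a running index (alternative algorithm; same cost).


-- ===== PORT A =====
-- Port of A: sublist lengths computed first, then a fold keeping (de_flattened, index),
-- each step appending flat_list[index:index+length] and advancing index.
def deflatten (flat_list : List Int) (original_shape_list : List (List Int)) : List (List Int) :=
  let sublist_lengths : List Int := original_shape_list.map (fun sublist => (sublist.length : Int))
  (sublist_lengths.foldl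
    (fun (st : List (List Int) × Int) length =>
      (st.1 ++ [PySem.List.slice flat_list (some st.2) (some (st.2 + length))], st.2 + length))
    ([], 0)).1

-- ===== PORT B =====
-- Port of B: label each flat position with its sublist number (the comprehension over
-- enumerate), pre-allocate empty buckets, then one pass over zip(flat_list, labels)
-- appending each element to its bucket.  Labels come from enumerate so they are ≥ 0;
-- .toNat is exact here (result[j].append with j a nonnegative index).
def deflatten_alt (flat_list : List Int) (original_shape_list : List (List Int)) : List (List Int) :=
  let labels : List Int :=
    (PySem.List.enumerate original_shape_list).flatMap
      (fun p => List.replicate p.2.length p.1)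
  let result : List (List Int) := List.replicate original_shape_list.length []
  (flat_list.zip labels).foldl
    (fun result p => result.set p.2.toNat ((result.getD p.2.toNat []) ++ [p.1]))
    result

-- ===== PRECONDITION & SPEC =====
def Spec_deflatten (flat_list : List Int) (original_shape_list : List (List Int)) (out : List (List Int)) : Prop := out = deflatten_alt flat_list original_shape_list
instance (flat_list : List Int) (original_shape_list : List (List Int)) (out : List (List Int)) : Decidable (Spec_deflatten flat_list original_shape_list out) := by unfold Spec_deflatten; infer_instance

-- ===== CLAIM (what is proved, stated in full; the proofs are below) =====
def Claim_equal_deflatten : Prop := ∀ (flat_list : List Int) (original_shape_list : List (List Int)), Dom_deflatten flat_list original_shape_list → Spec_deflatten flat_list original_shape_list (deflatten flat_list original_shape_list)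

-- ===== LEMMAS AND PROOFS =====

-- Reference shape: consecutive take/drop chunks; both ports are proved equal to it.
def pvChunks (flat : List Int) (shape : List (List Int)) : List (List Int) :=
  match shape with
  | [] => []
  | s :: rest => flat.take s.length :: pvChunks (flat.drop s.length) rest

-- the labels list of B, with an arbitrary enumerate start
def pvLabels (shape : List (List Int)) : List Int :=
  (PySem.List.enumerate shape).flatMap (fun p => List.replicate p.2.length p.1)

-- B's fold step
def pvStep (result : List (List Int)) (p : Int × Int) : List (List Int) :=
  result.set p.2.toNat ((result.getD p.2.toNat []) ++ [p.1])

theorem pvLabels_shift (shape : List (List Int)) : ∀ (s : Int),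
    (PySem.List.enumerate shape (s+1)).flatMap (fun p => List.replicate p.2.length p.1)
    = ((PySem.List.enumerate shape s).flatMap (fun p => List.replicate p.2.length p.1)).map (· + 1) := by
  induction shape with
  | nil => intro s; simp [PySem.List.enumerate_nil]
  | cons x xs ih =>
    intro s
    simp [PySem.List.enumerate_cons, ih (s+1), List.map_replicate]

theorem pvLabels_cons (s : List Int) (rest : List (List Int)) :
    pvLabels (s :: rest) = List.replicate s.length (0:Int) ++ (pvLabels rest).map (· + 1) := by
  unfold pvLabels
  rw [PySem.List.enumerate_cons]
  simp only [List.flatMap_cons]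
  congr 1
  exact pvLabels_shift rest 0

theorem pvLabels_nonneg (shape : List (List Int)) : ∀ j ∈ pvLabels shape, 0 ≤ j := by
  induction shape with
  | nil => simp [pvLabels, PySem.List.enumerate_nil]
  | cons s rest ih =>
    intro j hj
    rw [pvLabels_cons] at hj
    rcases List.mem_append.1 hj with h | h
    · simp_all [List.eq_of_mem_replicate h]
    · rcases List.mem_map.1 h with ⟨k, hk, rfl⟩
      have := ih k hk; omega

-- filling bucket 0: the first n labels are 0
theorem pvFill (n : Nat) : ∀ (flat : List Int) (L : List Int) (b0 : List Int) (bs : List (List Int)),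
    ((flat.zip (List.replicate n (0:Int) ++ L)).foldl pvStep (b0 :: bs))
    = ((flat.drop n).zip L).foldl pvStep ((b0 ++ flat.take n) :: bs) := by
  induction n with
  | zero => intro flat L b0 bs; simp
  | succ n ih =>
    intro flat L b0 bs
    cases flat with
    | nil => simp
    | cons x flat' =>
      have h0 : pvStep (b0 :: bs) (x, (0:Int)) = (b0 ++ [x]) :: bs := by
        simp [pvStep, List.getD]
      simp only [List.replicate_succ, List.cons_append, List.zip_cons_cons, List.foldl_cons, h0,
        List.drop_succ_cons, List.take_succ_cons]
      rw [ih flat' L (b0 ++ [x]) bs]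
      simp

-- labels all shifted by one: bucket 0 is untouched, the rest fold recursively
theorem pvShiftFold (flat : List Int) : ∀ (L : List Int), (∀ j ∈ L, 0 ≤ j) →
    ∀ (b0 : List Int) (bs : List (List Int)),
    (flat.zip (L.map (· + 1))).foldl pvStep (b0 :: bs)
    = b0 :: (flat.zip L).foldl pvStep bs := by
  induction flat with
  | nil => intro L _ b0 bs; simp
  | cons x flat' ih =>
    intro L hL b0 bs
    cases L with
    | nil => simp
    | cons j L' =>
      have hj : (0:Int) ≤ j := hL j (by simp)
      have ht : (j + 1).toNat = j.toNat + 1 := by omega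
      have hstep : pvStep (b0 :: bs) (x, j + 1) = b0 :: pvStep bs (x, j) := by
        simp [pvStep, ht, List.getD]
      simp only [List.map_cons, List.zip_cons_cons, List.foldl_cons, hstep]
      exact ih L' (fun k hk => hL k (by simp [hk])) b0 (pvStep bs (x, j))

theorem deflatten_alt_eq_chunks (shape : List (List Int)) : ∀ (flat : List Int),
    deflatten_alt flat shape = pvChunks flat shape := by
  induction shape with
  | nil => intro flat; simp [deflatten_alt, PySem.List.enumerate_nil, pvChunks]
  | cons s rest ih =>
    intro flat
    show (flat.zip (pvLabels (s :: rest))).foldl pvStep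
        (List.replicate (s :: rest).length []) = pvChunks flat (s :: rest)
    rw [pvLabels_cons, List.length_cons, List.replicate_succ, pvFill]
    rw [pvShiftFold (flat.drop s.length) (pvLabels rest) (pvLabels_nonneg rest)]
    have : ((flat.drop s.length).zip (pvLabels rest)).foldl pvStep
        (List.replicate rest.length []) = deflatten_alt (flat.drop s.length) rest := rfl
    rw [this, ih (flat.drop s.length)]
    simp [pvChunks]

-- A-side loop invariant: starting the fold at index i with accumulator acc produces
-- acc ++ pvChunks (flat.drop i) shape.
theorem deflatten_fold_inv (flat_list : List Int) (shape : List (List Int)) :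
    ∀ (i : Nat) (acc : List (List Int)),
      ((shape.map (fun sublist => (sublist.length : Int))).foldl
        (fun (st : List (List Int) × Int) length =>
          (st.1 ++ [PySem.List.slice flat_list (some st.2) (some (st.2 + length))], st.2 + length))
        (acc, (i : Int))).1
      = acc ++ pvChunks (flat_list.drop i) shape := by
  induction shape with
  | nil => intro i acc; simp [pvChunks]
  | cons s rest ih =>
    intro i acc
    have hc : ((i : Int) + (s.length : Int)) = ((i + s.length : Nat) : Int) := by push_cast; ring
    have hs : PySem.List.slice flat_list (some (i : Int)) (some ((i + s.length : Nat) : Int))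
        = (flat_list.drop i).take s.length := by
      simpa using PySem.List.slice_natCast_add flat_list i s.length
    simp only [List.map_cons, List.foldl_cons, hc, hs]
    rw [ih (i + s.length) (acc ++ [(flat_list.drop i).take s.length])]
    simp [pvChunks, List.drop_drop, List.append_assoc]

-- ===== VERDICT (by name: the statement is the Claim_ definition above) =====
theorem deflatten_spec : Claim_equal_deflatten := by
  intro flat_list shape _hdom
  unfold Spec_deflatten deflatten
  rw [deflatten_alt_eq_chunks shape flat_list]
  have := deflatten_fold_inv flat_list shape 0 []
  simpa using this
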